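-- pv_equiv track=rewrite | github.com/Abrhammmo/Shipping-a-Data-Product | src/yolo/classifier.py | classify_image
-- ===== SOURCE A (Python) =====
-- def classify_image(detected_objects):
--     labels = {label for label, _ in detected_objects}
--
--     if "person" in labels and labels & {"bottle", "container"}:
--         return "promotional"
--     if labels & {"bottle", "container"}:
--         return "product_display"
--     if "person" in labels:
--         return "lifestyle"
--     return "other"
-- ===== SOURCE B (Python) =====
-- def classify_image(detected_objects):
--     # Categories form a join-semilattice:
--     # other < lifestyle, other < product_display, lifestyle v product_display = promotional.
--     def join(a, b):
--         if a == b: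
--             return a
--         if a == "other":
--             return b
--         if b == "other":
--             return a
--         return "promotional"
--
--     result = "other"
--     for label, _ in detected_objects:
--         if label == "person":
--             category = "lifestyle"
--         elif label in ("bottle", "container"):
--             category = "product_display"
--         else:
--             category = "other"
--         result = join(result, category)
--     return result
-- ===== Notes on version B (the rewrite author's own statement) =====
-- stated objective: alternative
-- what changed: Instead of gathering label facts and deciding at the end, B maps each detection to its own category string and folds them with a join operation on the four-category semilattice (lifestyle v product_display = promotional), so the running value IS the answer and there is no set, no flags and no final cascade or table.
import Mathlib
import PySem

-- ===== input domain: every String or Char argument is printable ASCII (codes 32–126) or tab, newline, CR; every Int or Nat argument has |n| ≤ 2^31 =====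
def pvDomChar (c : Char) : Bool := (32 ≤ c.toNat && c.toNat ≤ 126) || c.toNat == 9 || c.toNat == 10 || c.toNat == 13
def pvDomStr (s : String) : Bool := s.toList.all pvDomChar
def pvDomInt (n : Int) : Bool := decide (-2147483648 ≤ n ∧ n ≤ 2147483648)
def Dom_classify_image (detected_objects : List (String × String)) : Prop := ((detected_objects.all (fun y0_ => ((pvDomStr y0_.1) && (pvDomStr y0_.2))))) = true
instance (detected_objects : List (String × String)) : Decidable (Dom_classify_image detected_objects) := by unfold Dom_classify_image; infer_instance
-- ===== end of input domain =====

-- B folds detections through a join operation on the four-category semilattice instead of A's set-comprehension + if-cascade (alternative decomposition; same cost).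


-- ===== PORT A =====
def classify_image (detected_objects : List (String × String)) : String :=
  let labels : PySem.Set String := PySem.Set.ofList (detected_objects.map (fun p => p.1))
  if PySem.Set.contains labels "person" &&
     !(PySem.Set.inter labels (PySem.Set.ofList ["bottle", "container"])).isEmpty then
    "promotional"
  else if !(PySem.Set.inter labels (PySem.Set.ofList ["bottle", "container"])).isEmpty then
    "product_display"
  else if PySem.Set.contains labels "person" then
    "lifestyle"
  else
    "other"

-- ===== PORT B =====
-- join of the four-category semilattice (Source B's `join`)
def pvJoinCat (a b : String) : String :=
  if a == b then a
  else if a == "other" then b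
  else if b == "other" then a
  else "promotional"

def classify_image_alt (detected_objects : List (String × String)) : String :=
  detected_objects.foldl
    (fun result p =>
      pvJoinCat result
        (if p.1 == "person" then "lifestyle"
         else if p.1 == "bottle" || p.1 == "container" then "product_display"
         else "other"))
    "other"

-- ===== PRECONDITION & SPEC =====
def Spec_classify_image (detected_objects : List (String × String)) (out : String) : Prop := out = classify_image_alt detected_objects
instance (detected_objects : List (String × String)) (out : String) : Decidable (Spec_classify_image detected_objects out) := by unfold Spec_classify_image; infer_instance

-- ===== CLAIM =====
def Claim_equal_classify_image : Prop := ∀ (detected_objects : List (String × String)), Dom_classify_image detected_objects → Spec_classify_image detected_objects (classify_image detected_objects)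

-- ===== LEMMAS AND PROOFS =====

def pvHasPerson (l : List (String × String)) : Bool := l.any (fun p => p.1 == "person")
def pvHasProduct (l : List (String × String)) : Bool := l.any (fun p => p.1 == "bottle" || p.1 == "container")

-- the category encoded by a pair of presence facts
def pvEnc (a b : Bool) : String :=
  if a && b then "promotional" else if b then "product_display" else if a then "lifestyle" else "other"

theorem fold_eq (l : List (String × String)) (a b : Bool) :
    l.foldl
      (fun result p =>
        pvJoinCat result
          (if p.1 == "person" then "lifestyle"
           else if p.1 == "bottle" || p.1 == "container" then "product_display"
           else "other"))
      (pvEnc a b)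
    = pvEnc (a || pvHasPerson l) (b || pvHasProduct l) := by
  induction l generalizing a b with
  | nil => simp [pvHasPerson, pvHasProduct]
  | cons x xs ih =>
      simp only [List.foldl_cons, pvHasPerson, pvHasProduct, List.any_cons]
      by_cases h1 : x.1 == "person" <;> by_cases h2 : x.1 == "bottle" || x.1 == "container"
      · -- impossible: "person" is neither "bottle" nor "container"
        exfalso
        rw [beq_iff_eq] at h1
        simp [h1] at h2
      · have : pvJoinCat (pvEnc a b) "lifestyle" = pvEnc true b := by
          cases a <;> cases b <;> rfl
        simpa [h1, h2, this, pvHasPerson, pvHasProduct] using ih true b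
      · have : pvJoinCat (pvEnc a b) "product_display" = pvEnc a true := by
          cases a <;> cases b <;> rfl
        simpa [h1, h2, this, pvHasPerson, pvHasProduct] using ih a true
      · have : pvJoinCat (pvEnc a b) "other" = pvEnc a b := by
          cases a <;> cases b <;> rfl
        simpa [h1, h2, this, pvHasPerson, pvHasProduct] using ih a b

theorem containsPerson_eq (l : List (String × String)) :
    PySem.Set.contains (PySem.Set.ofList (l.map (fun p => p.1))) "person" = pvHasPerson l := by
  rw [Bool.eq_iff_iff]
  simp only [PySem.Set.contains_iff, PySem.Set.mem_ofList, List.mem_map, pvHasPerson,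
    List.any_eq_true, beq_iff_eq]

theorem interProduct_eq (l : List (String × String)) :
    (PySem.Set.inter (PySem.Set.ofList (l.map (fun p => p.1)))
        (PySem.Set.ofList ["bottle", "container"])).isEmpty = !pvHasProduct l := by
  rw [Bool.eq_iff_iff]
  simp [List.isEmpty_iff, List.eq_nil_iff_forall_not_mem, PySem.Set.mem_inter,
    PySem.Set.mem_ofList, List.mem_map, pvHasProduct]

theorem classify_A_eq (l : List (String × String)) :
    classify_image l = pvEnc (pvHasPerson l) (pvHasProduct l) := by
  simp only [classify_image, containsPerson_eq, interProduct_eq]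
  cases pvHasPerson l <;> cases pvHasProduct l <;> rfl

theorem classify_B_eq (l : List (String × String)) :
    classify_image_alt l = pvEnc (pvHasPerson l) (pvHasProduct l) := by
  have h := fold_eq l false false
  simpa [classify_image_alt, pvEnc] using h

-- ===== VERDICT =====
theorem classify_image_spec : Claim_equal_classify_image := by
  intro l _
  unfold Spec_classify_image
  rw [classify_A_eq, classify_B_eq]
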